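-- pv_equiv track=rewrite | github.com/stemperor/PHY571 | utility.py | true_zones
-- ===== SOURCE A (Python) =====
-- def true_zones(lst):
--     first = lst[0]
--     in_zone = lst[0]
--     start = None
--     zones = []
--
--     for i in range(len(lst)):
--         if lst[i]:
--             if not in_zone:
--                 in_zone = True
--                 start = i
--         else:
--             if in_zone:
--                 in_zone = False
--                 if first:
--                     first = False
--                 else:
--                     zones.append([start, i])
--
--     return zones
-- ===== SOURCE B (Python) =====
-- def true_zones(lst):
--     adj = list(enumerate(zip(lst, lst[1:]), 1))
--     rises = [i for i, (p, c) in adj if c and not p]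
--     falls = [i for i, (p, c) in adj if p and not c]
--     if lst and lst[0]:
--         falls = falls[1:]
--     return [[s, e] for s, e in zip(rises, falls)]
-- ===== Notes on version B (the rewrite author's own statement) =====
-- stated objective: alternative
-- what changed: A runs an in_zone/first state machine appending zones as it goes; B detects rise and fall edge indices from adjacent pairs in two comprehensions, drops the leading fall when lst[0] is truthy, and zips rises with falls (zip naturally dropping an unclosed trailing run).
import Mathlib
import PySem

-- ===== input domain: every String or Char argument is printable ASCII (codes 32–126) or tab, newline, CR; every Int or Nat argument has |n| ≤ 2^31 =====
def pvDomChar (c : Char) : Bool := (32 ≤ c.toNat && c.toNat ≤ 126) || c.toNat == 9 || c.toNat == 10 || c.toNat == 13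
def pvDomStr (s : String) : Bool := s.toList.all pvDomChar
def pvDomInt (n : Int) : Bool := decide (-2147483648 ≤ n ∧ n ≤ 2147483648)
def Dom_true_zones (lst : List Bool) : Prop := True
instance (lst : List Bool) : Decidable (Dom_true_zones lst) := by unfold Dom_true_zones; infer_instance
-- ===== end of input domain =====

-- B replaces A's in_zone/first state machine by edge detection: collect rise and fall
-- indices from adjacent pairs, drop the leading fall when lst[0] is truthy, zip them.
-- Equivalence is about the RETURN value on nonempty input (A raises IndexError on []).

-- ===== PORT A =====
-- loop body: state is (first, in_zone, start, zones).
-- Python appends [start, i]; start is an Option here ('None'), but on every input where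
-- the append runs start has been set (first covers the lst[0]-zone), so .getD 0 is exact.
def true_zones_stepA (st : Bool × Bool × Option Int × List (List Int)) (p : Int × Bool) :
    Bool × Bool × Option Int × List (List Int) :=
  let (first, inz, start, zones) := st
  let (i, x) := p
  if x then
    if !inz then (first, true, some i, zones) else st
  else
    if inz then
      if first then (false, false, start, zones)
      else (first, false, start, zones ++ [[start.getD 0, i]])
    else st

-- 'for i in range(len(lst)): … lst[i] …' ported as a fold over enumerate lst 0
-- (exact: i ranges over 0..len-1 and lst[i] is the paired element).
def true_zones (lst : List Bool) : List (List Int) :=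
  let first := (PySem.List.pyGet? lst 0).getD false   -- lst[0]; none (IndexError) excluded by Pre_
  (((PySem.List.enumerate lst 0).foldl true_zones_stepA (first, first, none, []))).2.2.2

-- ===== PORT B =====
def true_zones_alt (lst : List Bool) : List (List Int) :=
  let adj := PySem.List.enumerate (lst.zip (PySem.List.slice lst (some 1) none)) 1
  let rises := (adj.filter (fun pc => pc.2.2 && !pc.2.1)).map (·.1)
  let falls := (adj.filter (fun pc => pc.2.1 && !pc.2.2)).map (·.1)
  let falls := if (PySem.List.pyGet? lst 0).getD false then falls.tail else falls  -- 'if lst and lst[0]'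
  (rises.zip falls).map (fun se => [se.1, se.2])

-- ===== PRECONDITION & SPEC =====
-- A raises IndexError on the empty list (lst[0]); Pre_ excludes exactly that input.
def Pre_true_zones (lst : List Bool) : Prop := lst ≠ []
instance (lst : List Bool) : Decidable (Pre_true_zones lst) := by unfold Pre_true_zones; infer_instance
def pvWitness_true_zones : List Bool := [false, true, true, false, true]

def Spec_true_zones (lst : List Bool) (out : List (List Int)) : Prop := out = true_zones_alt lst
instance (lst : List Bool) (out : List (List Int)) : Decidable (Spec_true_zones lst out) := by unfold Spec_true_zones; infer_instance

-- ===== CLAIM (what is proved, stated in full; the proofs are below) =====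
def Claim_equal_true_zones : Prop := ∀ (lst : List Bool), Dom_true_zones lst → Pre_true_zones lst → Spec_true_zones lst (true_zones lst)

-- ===== LEMMAS AND PROOFS =====

-- structural edge detectors: rise/fall indices of t scanned with previous value p, index k
def risesF (p : Bool) (k : Int) : List Bool → List Int
  | [] => []
  | c :: t => if c && !p then k :: risesF c (k + 1) t else risesF c (k + 1) t

def fallsF (p : Bool) (k : Int) : List Bool → List Int
  | [] => []
  | c :: t => if p && !c then k :: fallsF c (k + 1) t else fallsF c (k + 1) t

lemma rises_eq (t : List Bool) : ∀ (p : Bool) (k : Int),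
    ((PySem.List.enumerate ((p :: t).zip t) k).filter (fun pc => pc.2.2 && !pc.2.1)).map (·.1)
      = risesF p k t := by
  induction t with
  | nil => intro p k; rfl
  | cons c t ih =>
      intro p k
      simp only [List.zip_cons_cons, PySem.List.enumerate_cons, List.filter_cons, risesF]
      by_cases h : c && !p <;> simp [h, ih c (k + 1)]

lemma falls_eq (t : List Bool) : ∀ (p : Bool) (k : Int),
    ((PySem.List.enumerate ((p :: t).zip t) k).filter (fun pc => pc.2.1 && !pc.2.2)).map (·.1)
      = fallsF p k t := by
  induction t with
  | nil => intro p k; rfl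
  | cons c t ih =>
      intro p k
      simp only [List.zip_cons_cons, PySem.List.enumerate_cons, List.filter_cons, fallsF]
      by_cases h : p && !c <;> simp [h, ih c (k + 1)]

-- pair up rises and falls as zones
def zipRF (rs fs : List Int) : List (List Int) := (rs.zip fs).map (fun se => [se.1, se.2])

lemma zipRF_cons_cases (k : Int) (rs fs : List Int) :
    zipRF (k :: rs) fs = match fs with
      | [] => []
      | f :: fs' => [k, f] :: zipRF rs fs' := by
  cases fs <;> rfl

-- the loop invariant: A's state machine on the suffix t (previous element p = in_zone,
-- position k) produces exactly the zipped edges of the suffix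
lemma loopA (t : List Bool) : ∀ (first p : Bool) (s : Option Int) (zones : List (List Int)) (k : Int),
    (first = true → p = true) →
    ((PySem.List.enumerate t k).foldl true_zones_stepA (first, p, s, zones)).2.2.2
      = zones ++ (if first then zipRF (risesF p k t) ((fallsF p k t).tail)
          else if p then
            (match fallsF p k t with
              | [] => []
              | f :: fs => [s.getD 0, f] :: zipRF (risesF p k t) fs)
          else zipRF (risesF p k t) (fallsF p k t)) := by
  induction t with
  | nil => intro first p s zones k _; cases first <;> cases p <;> simp [risesF, fallsF, zipRF]
  | cons c t ih =>
      intro first p s zones k hfp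
      rw [PySem.List.enumerate_cons]
      cases p with
      | true =>
          cases c with
          | true =>
              -- no edge, state unchanged
              have : true_zones_stepA (first, true, s, zones) (k, true) = (first, true, s, zones) := by
                simp [true_zones_stepA]
              simp only [List.foldl_cons, this, risesF, fallsF]
              simpa using ih first true s zones (k + 1) hfp
          | false =>
              -- fall at k
              cases first with
              | true =>
                  have : true_zones_stepA (true, true, s, zones) (k, false) = (false, false, s, zones) := by
                    simp [true_zones_stepA]
                  simp only [List.foldl_cons, this, risesF, fallsF]
                  simpa using ih false false s zones (k + 1) (by simp)
              | false =>
                  have : true_zones_stepA (false, true, s, zones) (k, false)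
                      = (false, false, s, zones ++ [[s.getD 0, k]]) := by
                    simp [true_zones_stepA]
                  simp only [List.foldl_cons, this, risesF, fallsF]
                  rw [ih false false s (zones ++ [[s.getD 0, k]]) (k + 1) (by simp)]
                  simp
      | false =>
          have hf : first = false := by
            cases first
            · rfl
            · exact absurd (hfp rfl) (by simp)
          subst hf
          cases c with
          | true =>
              -- rise at k
              have : true_zones_stepA (false, false, s, zones) (k, true) = (false, true, some k, zones) := by
                simp [true_zones_stepA]
              simp only [List.foldl_cons, this, risesF, fallsF]
              rw [ih false true (some k) zones (k + 1) (by simp)]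
              simp [zipRF_cons_cases]
          | false =>
              have : true_zones_stepA (false, false, s, zones) (k, false) = (false, false, s, zones) := by
                simp [true_zones_stepA]
              simp only [List.foldl_cons, this, risesF, fallsF]
              simpa using ih false false s zones (k + 1) (by simp)

-- ===== VERDICT (by name: the statement is the Claim_ definition above) =====
theorem true_zones_spec : Claim_equal_true_zones := by
  intro lst _ hpre
  unfold Spec_true_zones
  obtain ⟨c, t, rfl⟩ : ∃ c t, lst = c :: t := by
    cases lst with
    | nil => exact absurd rfl hpre
    | cons c t => exact ⟨c, t, rfl⟩
  unfold true_zones true_zones_alt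
  rw [PySem.List.slice_from_one]
  have hget : (PySem.List.pyGet? (c :: t) 0).getD false = c := by
    simp [PySem.List.pyGet?, PySem.List.pyIdx?]
  simp only [hget, List.tail_cons]
  simp only [PySem.List.enumerate_cons, List.foldl_cons, zero_add]
  have hstep0 : true_zones_stepA (c, c, none, []) (0, c) = (c, c, none, []) := by
    cases c <;> simp [true_zones_stepA]
  have h1 := loopA t c c none [] 1 (fun h => h)
  rw [rises_eq t c 1, falls_eq t c 1, hstep0, h1]
  cases c <;> simp [zipRF]
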